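-- pv_equiv track=rewrite | github.com/ishaanbuildsthings/leetcode | zTemplates Python/SegmentTree/testSeg.py | bruteForceLcm
-- ===== SOURCE A (Python) =====
-- import math
--
-- def bruteForceLcm(arr, l, r):
--     runningLcm = arr[l]
--     for i in range(l + 1, r + 1):
--         gcd = math.gcd(runningLcm, arr[i])
--         if gcd == 0:
--           return 0
--         runningLcm = (runningLcm * arr[i]) // gcd
--     return abs(runningLcm)
-- ===== SOURCE B (Python) =====
-- import math
--
-- def _lcm(a, b):
--     if a == 0 and b == 0:
--         return 0
--     return a * b // math.gcd(a, b)
--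
-- def bruteForceLcm(arr, l, r):
--     if l >= r:
--         return abs(arr[l])
--     m = (l + r) // 2
--     return _lcm(bruteForceLcm(arr, l, m), bruteForceLcm(arr, m + 1, r))
-- ===== Notes on version B (the rewrite author's own statement) =====
-- stated objective: alternative
-- what changed: Replaces A's left-to-right running-LCM fold with a balanced divide-and-conquer over the index range, combining halves with a guarded two-argument lcm helper; Pre_ requires every index in [l, r] to be in range, which also excludes inputs where A only avoids an IndexError by the accidental early `return 0` once two zeros are seen.
-- outside the precondition, e.g. on bruteForceLcm([-2, 0, 0, 6], -1, 147): A returns 0, B raises IndexError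
import Mathlib
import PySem

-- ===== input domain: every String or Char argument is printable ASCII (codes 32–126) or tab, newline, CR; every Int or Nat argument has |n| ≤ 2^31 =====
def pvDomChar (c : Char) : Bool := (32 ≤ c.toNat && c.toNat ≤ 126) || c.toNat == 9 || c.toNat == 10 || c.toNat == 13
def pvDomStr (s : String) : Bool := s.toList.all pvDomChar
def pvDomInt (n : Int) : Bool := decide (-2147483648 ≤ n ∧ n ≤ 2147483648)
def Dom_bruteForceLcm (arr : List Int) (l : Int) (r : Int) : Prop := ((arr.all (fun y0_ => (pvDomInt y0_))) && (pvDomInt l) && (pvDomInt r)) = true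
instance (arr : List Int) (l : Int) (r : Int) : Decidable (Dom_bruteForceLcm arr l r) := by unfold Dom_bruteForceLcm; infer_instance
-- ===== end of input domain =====

-- B replaces A's left-to-right running-LCM fold by a balanced divide-and-conquer over the
-- index range with a guarded two-argument lcm combiner (objective: alternative algorithm).

-- ===== PORT A =====
-- the for-loop of A; out-of-range arr[i] (excluded by Pre_) is defaulted to 0
def bruteForceLcmLoop (arr : List Int) (idxs : List Int) (running : Int) : Int :=
  match idxs with
  | [] => (running.natAbs : Int)                         -- final `return abs(runningLcm)`
  | i :: rest =>
      let x := (PySem.List.pyGet? arr i).getD 0          -- arr[i]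
      let g : Int := ((Int.gcd running x : Nat) : Int)   -- math.gcd(runningLcm, arr[i])
      if g = 0 then 0                                    -- early `return 0`
      else bruteForceLcmLoop arr rest (PySem.Int.floordiv (running * x) g)

def bruteForceLcm (arr : List Int) (l : Int) (r : Int) : Int :=
  bruteForceLcmLoop arr (PySem.List.pyRange (l + 1) (r + 1) 1) ((PySem.List.pyGet? arr l).getD 0)

-- ===== PORT B =====
-- Source B's helper _lcm(a, b)
def pyLcm (a b : Int) : Int :=
  if a = 0 ∧ b = 0 then 0
  else PySem.Int.floordiv (a * b) ((Int.gcd a b : Nat) : Int)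

def bruteForceLcm_alt (arr : List Int) (l : Int) (r : Int) : Int :=
  if _h : l ≥ r then (((PySem.List.pyGet? arr l).getD 0).natAbs : Int)   -- abs(arr[l])
  else
    let m := PySem.Int.floordiv (l + r) 2
    pyLcm (bruteForceLcm_alt arr l m) (bruteForceLcm_alt arr (m + 1) r)
termination_by (r - l).toNat
decreasing_by
  all_goals
    have hm : PySem.Int.floordiv (l + r) 2 = (l + r) / 2 :=
      PySem.Int.floordiv_eq_ediv_of_pos (by norm_num)
    simp only [hm] at *
    omega

-- ===== PRECONDITION & SPEC =====
-- Pre_ excludes the inputs on which A raises IndexError (some index in [l, r] out of range);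
-- this also excludes inputs where A only avoids the IndexError by its accidental early
-- `return 0` after meeting two zeros, on which B raises.
def Pre_bruteForceLcm (arr : List Int) (l : Int) (r : Int) : Prop :=
  PySem.Raise.InRange arr.length l ∧
  ∀ i ∈ PySem.List.pyRange (l + 1) (r + 1) 1, PySem.Raise.InRange arr.length i
instance (arr : List Int) (l : Int) (r : Int) : Decidable (Pre_bruteForceLcm arr l r) := by
  unfold Pre_bruteForceLcm; infer_instance

def pvWitness_bruteForceLcm : List Int × Int × Int := ([2, 3, 4], 0, 2)

def Spec_bruteForceLcm (arr : List Int) (l : Int) (r : Int) (out : Int) : Prop := out = bruteForceLcm_alt arr l r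
instance (arr : List Int) (l : Int) (r : Int) (out : Int) : Decidable (Spec_bruteForceLcm arr l r out) := by unfold Spec_bruteForceLcm; infer_instance

-- ===== CLAIM (what is proved, stated in full; the proofs are below) =====
def Claim_equal_bruteForceLcm : Prop := ∀ (arr : List Int) (l : Int) (r : Int), Dom_bruteForceLcm arr l r → Pre_bruteForceLcm arr l r → Spec_bruteForceLcm arr l r (bruteForceLcm arr l r)

-- ===== LEMMAS AND PROOFS =====

-- |arr[i]| (with the same out-of-range default as the ports)
def pvVal (arr : List Int) (i : Int) : Nat := ((PySem.List.pyGet? arr i).getD 0).natAbs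

-- LCM of a list of naturals
def pvF (L : List Nat) : Nat := L.foldr Nat.lcm 1

-- LCM of |arr[l..r]|
def pvRangeLcm (arr : List Int) (l r : Int) : Nat :=
  pvF ((PySem.List.pyRange l (r + 1) 1).map (pvVal arr))

theorem pvF_append (xs ys : List Nat) : pvF (xs ++ ys) = Nat.lcm (pvF xs) (pvF ys) := by
  induction xs with
  | nil => simp [pvF, Nat.lcm_one_left]
  | cons a xs ih => simp [pvF, List.foldr] at ih ⊢; rw [ih, Nat.lcm_assoc]

theorem pvFoldl_lcm_zero (L : List Nat) : L.foldl Nat.lcm 0 = 0 := by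
  induction L with
  | nil => rfl
  | cons a L ih => simpa [List.foldl, Nat.lcm_zero_left] using ih

theorem pvFoldl_eq_lcm_F (L : List Nat) : ∀ a : Nat, L.foldl Nat.lcm a = Nat.lcm a (pvF L) := by
  induction L with
  | nil => intro a; simp [pvF, Nat.lcm_one_right]
  | cons x L ih => intro a; simp only [List.foldl, pvF, List.foldr] at ih ⊢
                   rw [ih, Nat.lcm_assoc]

-- A's loop computes the fold of Nat.lcm over the absolute values
theorem pvLoop_eq (arr : List Int) (idxs : List Int) :
    ∀ running : Int,
      bruteForceLcmLoop arr idxs running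
        = (((idxs.map (pvVal arr)).foldl Nat.lcm running.natAbs : Nat) : Int) := by
  induction idxs with
  | nil => intro running; simp [bruteForceLcmLoop]
  | cons i rest ih =>
      intro running
      simp only [bruteForceLcmLoop, List.map, List.foldl]
      set x := (PySem.List.pyGet? arr i).getD 0 with hx
      by_cases hg : ((Int.gcd running x : Nat) : Int) = 0
      · have h0 : running = 0 ∧ x = 0 := by
          have : Int.gcd running x = 0 := by exact_mod_cast hg
          exact Int.gcd_eq_zero_iff.mp this
        simp only [h0.1, h0.2]
        have : pvVal arr i = 0 := by simp [pvVal, ← hx, h0.2]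
        rw [this]
        simp [pvFoldl_lcm_zero]
      · rw [if_neg hg, ih]
        congr 1
        have hgpos : (0 : Int) < ((Int.gcd running x : Nat) : Int) := by
          rcases lt_or_eq_of_le (Int.natCast_nonneg (Int.gcd running x)) with h | h
          · exact h
          · exact absurd h.symm hg
        have hdvd : ((Int.gcd running x : Nat) : Int) ∣ running * x :=
          Dvd.dvd.mul_right (Int.gcd_dvd_left running x) x
        rw [PySem.Int.floordiv_eq_ediv_of_pos hgpos]
        have : ((running * x) / ((Int.gcd running x : Nat) : Int)).natAbs
            = (running * x).natAbs / Int.gcd running x := by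
          rw [Int.natAbs_ediv_of_dvd hdvd]; simp
        rw [this, Int.natAbs_mul]
        have hval : pvVal arr i = x.natAbs := by simp [pvVal, ← hx]
        rw [hval]
        rfl

-- A equals the range LCM (for a nonempty index range)
theorem pvA_eq (arr : List Int) (l r : Int) (h : l ≤ r) :
    bruteForceLcm arr l r = ((pvRangeLcm arr l r : Nat) : Int) := by
  unfold bruteForceLcm pvRangeLcm
  rw [pvLoop_eq, PySem.List.pyRange_one_cons (by omega : l < r + 1)]
  simp only [List.map]
  rw [pvFoldl_eq_lcm_F]
  congr 1

-- Source B's _lcm on casts of naturals is Nat.lcm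
theorem pvPyLcm_cast (x y : Nat) : pyLcm (x : Int) (y : Int) = ((Nat.lcm x y : Nat) : Int) := by
  unfold pyLcm
  by_cases h : x = 0 ∧ y = 0
  · simp [h.1, h.2]
  · have hg : Nat.gcd x y ≠ 0 := by
      intro h0
      exact h ⟨Nat.eq_zero_of_gcd_eq_zero_left h0, Nat.eq_zero_of_gcd_eq_zero_right h0⟩
    have hiff : ¬ ((x : Int) = 0 ∧ (y : Int) = 0) := by
      intro ⟨hx, hy⟩; exact h ⟨by exact_mod_cast hx, by exact_mod_cast hy⟩
    rw [if_neg hiff]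
    have hgcd : Int.gcd (x : Int) (y : Int) = Nat.gcd x y := by simp [Int.gcd]
    have hmul : ((x : Int) * (y : Int)) = ((Nat.gcd x y : Nat) : Int) * ((Nat.lcm x y : Nat) : Int) := by
      exact_mod_cast (Nat.gcd_mul_lcm x y).symm
    rw [hgcd, hmul]
    rw [PySem.Int.floordiv_eq_ediv_of_pos (by exact_mod_cast Nat.pos_of_ne_zero hg)]
    exact Int.mul_ediv_cancel_left _ (by exact_mod_cast hg)

-- the range LCM splits at any midpoint
theorem pvRangeLcm_split (arr : List Int) (l m r : Int) (h1 : l ≤ m) (h2 : m ≤ r) :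
    pvRangeLcm arr l r = Nat.lcm (pvRangeLcm arr l m) (pvRangeLcm arr (m + 1) r) := by
  unfold pvRangeLcm
  rw [PySem.List.pyRange_one_append l (m + 1) (r + 1) (by omega) (by omega),
      List.map_append, pvF_append]

-- B equals the range LCM (for a nonempty index range)
theorem pvB_eq (arr : List Int) (n : Nat) :
    ∀ l r : Int, (r - l).toNat ≤ n → l ≤ r →
      bruteForceLcm_alt arr l r = ((pvRangeLcm arr l r : Nat) : Int) := by
  induction n with
  | zero =>
      intro l r hn hlr
      have : l = r := by omega
      subst this
      rw [bruteForceLcm_alt, dif_pos (le_refl l)]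
      unfold pvRangeLcm
      rw [PySem.List.pyRange_one_cons (by omega : l < l + 1),
          PySem.List.pyRange_one_eq_nil (by omega)]
      simp [pvF, pvVal, Nat.lcm_one_right]
  | succ n ih =>
      intro l r hn hlr
      by_cases heq : l = r
      · subst heq
        rw [bruteForceLcm_alt, dif_pos (le_refl l)]
        unfold pvRangeLcm
        rw [PySem.List.pyRange_one_cons (by omega : l < l + 1),
            PySem.List.pyRange_one_eq_nil (by omega)]
        simp [pvF, pvVal, Nat.lcm_one_right]
      · have hlt : l < r := lt_of_le_of_ne hlr heq
        rw [bruteForceLcm_alt, dif_neg (by omega)]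
        have hm : PySem.Int.floordiv (l + r) 2 = (l + r) / 2 :=
          PySem.Int.floordiv_eq_ediv_of_pos (by norm_num)
        have hb : l ≤ PySem.Int.floordiv (l + r) 2 ∧ PySem.Int.floordiv (l + r) 2 < r := by
          rw [hm]; omega
        show pyLcm (bruteForceLcm_alt arr l (PySem.Int.floordiv (l + r) 2))
               (bruteForceLcm_alt arr (PySem.Int.floordiv (l + r) 2 + 1) r)
             = ((pvRangeLcm arr l r : Nat) : Int)
        rw [ih l _ (by rw [hm] at hb ⊢; omega) hb.1,
            ih _ r (by rw [hm] at hb ⊢; omega) (by omega),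
            pvPyLcm_cast,
            pvRangeLcm_split arr l _ r hb.1 (le_of_lt hb.2)]

-- ===== VERDICT (by name: the statement is the Claim_ definition above) =====
theorem bruteForceLcm_spec : Claim_equal_bruteForceLcm := by
  intro arr l r _ _
  unfold Spec_bruteForceLcm
  by_cases h : l ≤ r
  · rw [pvA_eq arr l r h, pvB_eq arr (r - l).toNat l r (le_refl _) h]
  · -- r < l: A's loop range is empty, B takes its base case; both return |arr[l]|
    rw [bruteForceLcm_alt, dif_pos (by omega : l ≥ r)]
    unfold bruteForceLcm
    rw [PySem.List.pyRange_one_eq_nil (by omega)]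
    rfl
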